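-- pv_equiv track=rewrite | github.com/viniciusdebruin/ai-indexer | src/ai_indexer/core/graph.py | impact_radius
-- ===== SOURCE A (Python) =====
-- from collections import defaultdict, deque
--
-- def impact_radius(graph: dict[str, list[str]], node: str, depth: int = 2) -> int:
--     visited: set[str] = set()
--     q: deque[tuple[str, int]] = deque([(node, 0)])
--     count = 0
--     while q:
--         cur, dist = q.popleft()
--         if cur in visited or dist > depth:
--             continue
--         visited.add(cur)
--         if cur != node:
--             count += 1
--         for nxt in graph.get(cur, []):
--             if nxt not in visited:
--                 q.append((nxt, dist + 1))
--     return count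
-- ===== SOURCE B (Python) =====
-- def impact_radius(graph: dict[str, list[str]], node: str, depth: int = 2) -> int:
--     visited = {node}
--     frontier = {node}
--     level = 0
--     while frontier and level < depth:
--         frontier = {nxt for cur in frontier for nxt in graph.get(cur, []) if nxt not in visited}
--         visited |= frontier
--         level += 1
--     return len(visited) - 1
-- ===== Notes on version B (the rewrite author's own statement) =====
-- stated objective: alternative
-- what changed: Replaces the distance-tagged deque BFS (one while loop popping (node,dist) pairs, with a visited re-check at pop time and an incremental counter) by level-synchronized BFS over sets: a frontier set is expanded one whole level per outer iteration and the answer is len(visited)-1, so no queue, no distance tags, no duplicate entries and no counter.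
import Mathlib
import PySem

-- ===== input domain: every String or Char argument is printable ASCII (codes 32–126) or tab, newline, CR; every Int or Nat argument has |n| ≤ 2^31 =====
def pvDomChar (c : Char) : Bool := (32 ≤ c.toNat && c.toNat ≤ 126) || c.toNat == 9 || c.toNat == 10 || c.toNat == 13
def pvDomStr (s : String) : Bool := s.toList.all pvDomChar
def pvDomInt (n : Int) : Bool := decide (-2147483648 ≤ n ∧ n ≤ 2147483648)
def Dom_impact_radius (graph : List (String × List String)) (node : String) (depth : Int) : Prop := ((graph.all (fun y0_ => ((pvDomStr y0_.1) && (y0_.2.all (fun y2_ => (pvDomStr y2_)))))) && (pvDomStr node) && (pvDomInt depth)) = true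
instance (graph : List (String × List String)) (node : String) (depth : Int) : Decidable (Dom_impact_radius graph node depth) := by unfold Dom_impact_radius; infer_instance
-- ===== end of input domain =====

-- B replaces A's distance-tagged deque BFS by level-synchronized BFS over frontier sets (alternative decomposition, same counts).


-- graph.get(cur, []) of the Python dict (shared input accessor of both ports)
def pyAdj (graph : List (String × List String)) (v : String) : List String :=
  ((PySem.Dict.mk graph).get? v).getD []

-- occurrence list of every node name appearing in the input (start node, keys, targets);
-- only used to compute sufficient fuel for the totality of the loops (a totality guard, not part of the algorithms)
def pvUniv (graph : List (String × List String)) (node : String) : List String :=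
  node :: graph.flatMap (fun p => p.1 :: p.2)

-- ===== PORT A =====
-- A's while loop: pop (cur, dist) from the deque, skip if visited or too deep, else visit, count, push unvisited neighbours.
def goA (graph : List (String × List String)) (node : String) (depth : Int) :
    Nat → PySem.Set String → List (String × Int) → Int → Int
  | 0, _, _, count => count
  | _ + 1, _, [], count => count
  | fuel + 1, visited, (cur, dist) :: q, count =>
    if PySem.Set.contains visited cur || decide (dist > depth) then
      goA graph node depth fuel visited q count
    else
      let visited' := PySem.Set.add visited cur
      let count' := if cur ≠ node then count + 1 else count
      let pushes := (pyAdj graph cur).filter (fun nxt => !PySem.Set.contains visited' nxt)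
      goA graph node depth fuel visited' (q ++ pushes.map (fun n => (n, dist + 1))) count'

-- fuel: 2 + Σ_{occurrences x of pvUniv} (1 + |adj x|) bounds the number of loop iterations (proved below)
def fuelA (graph : List (String × List String)) (node : String) : Nat :=
  2 + (((pvUniv graph node).map (fun x => 1 + (pyAdj graph x).length)).sum)

def impact_radius (graph : List (String × List String)) (node : String) (depth : Int) : Int :=
  goA graph node depth (fuelA graph node) PySem.Set.empty [(node, 0)] 0

-- ===== PORT B =====
-- {nxt for cur in frontier for nxt in graph.get(cur, []) if nxt not in visited}
def nextFrontier (graph : List (String × List String)) (visited frontier : PySem.Set String) :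
    PySem.Set String :=
  frontier.foldl
    (fun acc cur =>
      (pyAdj graph cur).foldl
        (fun acc2 nxt => if PySem.Set.contains visited nxt then acc2 else PySem.Set.add acc2 nxt)
        acc)
    PySem.Set.empty

-- B's while loop: while frontier and level < depth, advance one whole BFS level.
def goB (graph : List (String × List String)) (depth : Int) :
    Nat → Int → PySem.Set String → PySem.Set String → PySem.Set String
  | 0, _, visited, _ => visited
  | fuel + 1, level, visited, frontier =>
    if !frontier.isEmpty && decide (level < depth) then
      let frontier' := nextFrontier graph visited frontier
      goB graph depth fuel (level + 1) (PySem.Set.update visited frontier') frontier'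
    else visited

-- fuel: each productive level grows visited inside pvUniv, so |pvUniv| + 2 iterations suffice (proved below)
def fuelB (graph : List (String × List String)) (node : String) : Nat :=
  (pvUniv graph node).length + 2

def impact_radius_alt (graph : List (String × List String)) (node : String) (depth : Int) : Int :=
  let visited := goB graph depth (fuelB graph node) 0 (PySem.Set.ofList [node]) (PySem.Set.ofList [node])
  (visited.length : Int) - 1

-- ===== PRECONDITION & SPEC =====
def Spec_impact_radius (graph : List (String × List String)) (node : String) (depth : Int) (out : Int) : Prop := out = impact_radius_alt graph node depth
instance (graph : List (String × List String)) (node : String) (depth : Int) (out : Int) : Decidable (Spec_impact_radius graph node depth out) := by unfold Spec_impact_radius; infer_instance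

-- ===== CLAIM (what is proved, stated in full; the proofs are below) =====
def Claim_equal_impact_radius : Prop := ∀ (graph : List (String × List String)) (node : String) (depth : Int), Dom_impact_radius graph node depth → Spec_impact_radius graph node depth (impact_radius graph node depth)

-- ===== LEMMAS AND PROOFS =====

-- ---------- spec-side reachability ----------
def nbrs (graph : List (String × List String)) (v : String) : Finset String :=
  (pyAdj graph v).toFinset

def RS (graph : List (String × List String)) (node : String) : Nat → Finset String
  | 0 => {node}
  | k + 1 => RS graph node k ∪ (RS graph node k).biUnion (nbrs graph)

theorem mem_RS_succ (graph : List (String × List String)) (node : String) (k : Nat) (y : String) :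
    y ∈ RS graph node (k + 1) ↔ y ∈ RS graph node k ∨ ∃ x ∈ RS graph node k, y ∈ pyAdj graph x := by
  simp [RS, nbrs, Finset.mem_biUnion, List.mem_toFinset]

theorem RS_le (graph : List (String × List String)) (node : String) {k m : Nat} (h : k ≤ m) :
    RS graph node k ⊆ RS graph node m := by
  induction m with
  | zero => simp_all
  | succ m ih =>
    rcases Nat.lt_or_ge k (m + 1) with h' | h'
    · exact (ih (Nat.lt_succ_iff.mp h')).trans (by simp [RS])
    · have : k = m + 1 := le_antisymm h h'
      subst this; exact subset_rfl

theorem node_mem_RS (graph : List (String × List String)) (node : String) (k : Nat) :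
    node ∈ RS graph node k :=
  RS_le graph node (Nat.zero_le k) (by simp [RS])

theorem RS_stab (graph : List (String × List String)) (node : String) {k : Nat}
    (h : RS graph node (k + 1) ⊆ RS graph node k) {m : Nat} (hm : k ≤ m) :
    RS graph node m = RS graph node k := by
  induction m with
  | zero =>
    have : k = 0 := Nat.le_zero.mp hm
    simp [this]
  | succ m ih =>
    rcases Nat.lt_or_ge k (m + 1) with h' | h'
    · have hkm : k ≤ m := Nat.lt_succ_iff.mp h'
      have hm' := ih hkm
      apply le_antisymm
      · intro y hy
        rw [mem_RS_succ] at hy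
        rcases hy with hy | ⟨x, hx, hy⟩
        · rw [hm'] at hy; exact hy
        · rw [hm'] at hx
          exact h (by rw [mem_RS_succ]; exact Or.inr ⟨x, hx, hy⟩)
      · rw [← hm']; exact RS_le graph node (Nat.le_succ m)
    · have : k = m + 1 := le_antisymm hm h'
      simp [this]

theorem pyAdj_subset (graph : List (String × List String)) (x y : String)
    (h : y ∈ pyAdj graph x) : y ∈ graph.flatMap (fun p => p.1 :: p.2) := by
  induction graph with
  | nil => simp [pyAdj, PySem.Dict.get?] at h
  | cons p t ih =>
    obtain ⟨k, v⟩ := p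
    unfold pyAdj at h
    rw [PySem.Dict.get?_mk_cons] at h
    simp only [List.flatMap_cons, List.mem_append, List.mem_cons]
    by_cases hk : (k == x) = true
    · rw [if_pos hk] at h
      simp only [Option.getD_some] at h
      exact Or.inl (Or.inr h)
    · rw [if_neg hk] at h
      exact Or.inr (ih h)

theorem RS_subset_univ (graph : List (String × List String)) (node : String) (k : Nat)
    (x : String) (hx : x ∈ RS graph node k) : x ∈ pvUniv graph node := by
  induction k with
  | zero =>
    simp [RS] at hx
    simp [pvUniv, hx]
  | succ k ih =>
    rw [mem_RS_succ] at hx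
    rcases hx with hx | ⟨u, _, hx⟩
    · exact ih hx
    · simp only [pvUniv, List.mem_cons]
      exact Or.inr (pyAdj_subset graph u x hx)

-- ---------- sum bookkeeping for the fuel bounds ----------
theorem sum_map_mono (f g : String → Nat) (h : ∀ x, g x ≤ f x) (l : List String) :
    (l.map g).sum ≤ (l.map f).sum := by
  induction l with
  | nil => simp
  | cons a t ih => simp only [List.map_cons, List.sum_cons]; exact Nat.add_le_add (h a) ih

theorem sum_map_drop (f g : String → Nat) (h : ∀ x, g x ≤ f x) (l : List String) (y : String)
    (hy : y ∈ l) (hgy : g y = 0) : (l.map g).sum + f y ≤ (l.map f).sum := by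
  induction l with
  | nil => simp at hy
  | cons a t ih =>
    simp only [List.map_cons, List.sum_cons]
    rcases List.mem_cons.mp hy with rfl | hy'
    · have := sum_map_mono f g h t
      omega
    · have := ih hy'
      have := h a
      omega

theorem sum_map_le_length (f : String → Nat) (h : ∀ x, f x ≤ 1) (l : List String) :
    (l.map f).sum ≤ l.length := by
  induction l with
  | nil => simp
  | cons a t ih => simp only [List.map_cons, List.sum_cons, List.length_cons]
                   have := h a; omega

-- potentials (proof-side only)
def WA (graph : List (String × List String)) (node : String) (visited : PySem.Set String) : Nat :=
  ((pvUniv graph node).map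
    (fun x => if PySem.Set.contains visited x then 0 else 1 + (pyAdj graph x).length)).sum

def WB (graph : List (String × List String)) (node : String) (visited : PySem.Set String) : Nat :=
  ((pvUniv graph node).map (fun x => if PySem.Set.contains visited x then 0 else 1)).sum

theorem WA_drop (graph : List (String × List String)) (node : String)
    (visited : PySem.Set String) (cur : String)
    (hu : cur ∈ pvUniv graph node) (hv : cur ∉ visited) :
    WA graph node (PySem.Set.add visited cur) + (1 + (pyAdj graph cur).length) ≤
      WA graph node visited := by
  have hpt : ∀ x, (if PySem.Set.contains (PySem.Set.add visited cur) x then 0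
        else 1 + (pyAdj graph x).length) ≤
      (if PySem.Set.contains visited x then 0 else 1 + (pyAdj graph x).length) := by
    intro x
    by_cases hx : x ∈ visited
    · have hx' : x ∈ PySem.Set.add visited cur := (PySem.Set.mem_add _ _ _).mpr (Or.inl hx)
      simp [hx, hx']
    · simp [hx]
      split <;> omega
  have h0 : (if PySem.Set.contains (PySem.Set.add visited cur) cur then 0
      else 1 + (pyAdj graph cur).length) = 0 := by
    have : cur ∈ PySem.Set.add visited cur := (PySem.Set.mem_add _ _ _).mpr (Or.inr rfl)
    simp [this]
  have h1 : (if PySem.Set.contains visited cur then 0 else 1 + (pyAdj graph cur).length)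
      = 1 + (pyAdj graph cur).length := by
    simp [hv]
  have := sum_map_drop _ _ hpt (pvUniv graph node) cur hu h0
  unfold WA
  omega

theorem WB_drop (graph : List (String × List String)) (node : String)
    (visited visited' : PySem.Set String) (y : String)
    (hsub : ∀ x ∈ visited, x ∈ visited')
    (hu : y ∈ pvUniv graph node) (hyv : y ∉ visited) (hyv' : y ∈ visited') :
    WB graph node visited' + 1 ≤ WB graph node visited := by
  have hpt : ∀ x, (if PySem.Set.contains visited' x then 0 else 1) ≤
      (if PySem.Set.contains visited x then 0 else 1) := by
    intro x
    by_cases hx : x ∈ visited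
    · simp [hx, hsub x hx]
    · simp [hx]
      split <;> omega
  have h0 : (if PySem.Set.contains visited' y then 0 else 1) = 0 := by
    simp [hyv']
  have h1 : (if PySem.Set.contains visited y then 0 else 1) = 1 := by
    simp [hyv]
  have := sum_map_drop _ _ hpt (pvUniv graph node) y hu h0
  unfold WB
  omega

theorem toFinset_add (visited : PySem.Set String) (cur : String) (h : cur ∉ visited) :
    (PySem.Set.add visited cur).toFinset = insert cur visited.toFinset := by
  rw [PySem.Set.add_of_not_mem h]
  ext y
  simp [List.mem_toFinset]

theorem count_step (visited : PySem.Set String) (node cur : String) (count : Int)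
    (hv : cur ∉ visited)
    (hc : count = (((visited.toFinset).erase node).card : Int)) :
    (if cur ≠ node then count + 1 else count) =
      ((((PySem.Set.add visited cur).toFinset).erase node).card : Int) := by
  rw [toFinset_add visited cur hv]
  by_cases hcn : cur = node
  · subst hcn
    simp [Finset.erase_insert_eq_erase, hc]
  · rw [if_pos hcn]
    rw [Finset.erase_insert_of_ne hcn]
    have hnot : cur ∉ visited.toFinset.erase node :=
      fun hmem => hv (List.mem_toFinset.mp (Finset.mem_of_mem_erase hmem))
    rw [Finset.card_insert_of_notMem hnot, hc]
    push_cast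
    ring

-- ---------- A: the queue invariant ----------
-- The queue always consists of a block tagged d followed by a block tagged d+1;
-- the invariant ties visited/queue/count to the reachability sets RS.
theorem goA_inv (graph : List (String × List String)) (node : String) (depth : Int) (D : Nat)
    (hdep : depth = (D : Int)) :
    ∀ n : Nat, ∀ f d : Nat, ∀ l1 l2 : List String, ∀ visited : PySem.Set String, ∀ count : Int,
    2 * (l1.length + l2.length + WA graph node visited) + (if l1 = [] then 1 else 0) ≤ n →
    l1.length + l2.length + WA graph node visited < f →
    visited.Nodup →
    d ≤ D + 1 →
    (∀ x ∈ visited, x ∈ RS graph node (min d D)) →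
    (∀ x ∈ l1, x ∈ RS graph node d) →
    (∀ x ∈ l2, x ∈ RS graph node (d + 1)) →
    (d ≤ D → ∀ x ∈ RS graph node d, x ∈ visited ∨ x ∈ l1) →
    (d ≤ D → ∀ x ∈ visited, ∀ y ∈ pyAdj graph x, y ∈ visited ∨ y ∈ l1 ∨ y ∈ l2) →
    (d = D + 1 → (∀ x ∈ RS graph node D, x ∈ visited) ∧ l2 = []) →
    count = (((visited.toFinset).erase node).card : Int) →
    goA graph node depth f visited
        (l1.map (fun x => (x, (d : Int))) ++ l2.map (fun x => (x, (d : Int) + 1))) count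
      = (((RS graph node D).erase node).card : Int) := by
  intro n
  induction n using Nat.strong_induction_on with
  | _ n IH =>
  intro fuel d l1 l2 visited count hn hfuel hnd hd hV hl1 hl2 hcov hN hend hcount
  obtain ⟨f, rfl⟩ : ∃ f, fuel = f + 1 := ⟨fuel - 1, by omega⟩
  cases l1 with
  | nil =>
    cases l2 with
    | nil =>
      simp only [List.map_nil, List.nil_append]
      have hgoal : goA graph node depth (f + 1) visited [] count = count := by
        simp [goA]
      rw [hgoal, hcount]
      rcases Nat.lt_or_ge d (D + 1) with hlt | hge
      · -- d ≤ D : visited = RS d, and RS has stabilised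
        have hdD : d ≤ D := Nat.lt_succ_iff.mp hlt
        have hVd : ∀ x ∈ visited, x ∈ RS graph node d := by
          intro x hx
          have := hV x hx
          rwa [Nat.min_eq_left hdD] at this
        have hveq : visited.toFinset = RS graph node d := by
          ext y
          simp only [List.mem_toFinset]
          exact ⟨fun hy => hVd y hy,
                 fun hy => (hcov hdD y hy).resolve_right (by simp)⟩
        have hstab : RS graph node (d + 1) ⊆ RS graph node d := by
          intro y hy
          rw [mem_RS_succ] at hy
          rcases hy with hy | ⟨x, hx, hyx⟩
          · exact hy
          · have hxv : x ∈ visited := (hcov hdD x hx).resolve_right (by simp)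
            have := hN hdD x hxv y hyx
            rcases this with h | h | h
            · exact hVd y h
            · simp at h
            · simp at h
        rw [hveq, RS_stab graph node hstab hdD]
      · -- d = D + 1 : visited = RS D
        have hDd : d = D + 1 := by omega
        obtain ⟨hsubD, -⟩ := hend hDd
        have hveq : visited.toFinset = RS graph node D := by
          ext y
          simp only [List.mem_toFinset]
          constructor
          · intro hy
            have := hV y hy
            rwa [hDd, Nat.min_eq_right (by omega)] at this
          · exact fun hy => hsubD y hy
        rw [hveq]
    | cons c l2t =>
      -- level change: drop to level d+1
      have hdD : d ≤ D := by
        by_contra h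
        have hDd : d = D + 1 := by omega
        have := (hend hDd).2
        simp at this
      have hcast : ∀ x : String, (x, (d : Int) + 1) = (x, ((d + 1 : Nat) : Int)) := by
        intro x; push_cast; ring_nf
      simp only [List.map_nil, List.nil_append, hcast]
      have hshape : (c :: l2t).map (fun x => (x, ((d + 1 : Nat) : Int))) =
          (c :: l2t).map (fun x => (x, ((d + 1 : Nat) : Int))) ++
            ([] : List String).map (fun x => (x, ((d + 1 : Nat) : Int) + 1)) := by
        simp
      rw [hshape]
      refine IH (n - 1) (by simp at hn ⊢; omega) (f + 1) (d + 1) (c :: l2t) [] visited count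
        ?_ ?_ hnd ?_ ?_ ?_ ?_ ?_ ?_ ?_ hcount
      · simp at hn ⊢; omega
      · simp at hfuel ⊢; omega
      · omega
      · intro x hx
        have := hV x hx
        exact RS_le graph node (by omega) this
      · exact hl2
      · simp
      · intro hd1 x hx
        rw [mem_RS_succ] at hx
        rcases hx with hx | ⟨u, hu, hxu⟩
        · exact Or.inl ((hcov hdD x hx).resolve_right (by simp))
        · have huv : u ∈ visited := (hcov hdD u hu).resolve_right (by simp)
          have := hN hdD u huv x hxu
          rcases this with h | h | h
          · exact Or.inl h
          · simp at h
          · exact Or.inr h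
      · intro hd1 x hx y hy
        have := hN hdD x hx y hy
        rcases this with h | h | h
        · exact Or.inl h
        · simp at h
        · exact Or.inr (Or.inl h)
      · intro hd1
        have hdD' : d = D := by omega
        constructor
        · intro x hx
          subst hdD'
          exact (hcov (le_refl d) x hx).resolve_right (by simp)
        · rfl
  | cons cur l1t =>
    simp only [List.map_cons, List.cons_append, goA]
    by_cases hvc : cur ∈ visited
    · -- skip: already visited
      have hcb : PySem.Set.contains visited cur = true := by simp [hvc]
      rw [hcb, Bool.true_or, if_pos rfl]
      refine IH (n - 1) ?_ f d l1t l2 visited count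
        ?_ ?_ hnd hd hV ?_ hl2 ?_ ?_ hend hcount
      · have hne : (if cur :: l1t = [] then (1 : Nat) else 0) = 0 := by simp
        simp only [List.length_cons] at hn
        rw [hne] at hn
        omega
      · have hind : (if l1t = [] then (1 : Nat) else 0) ≤ 1 := by split <;> omega
        have hne : (if cur :: l1t = [] then (1 : Nat) else 0) = 0 := by simp
        simp only [List.length_cons] at hn
        rw [hne] at hn
        omega
      · simp only [List.length_cons] at hfuel
        omega
      · exact fun x hx => hl1 x (List.mem_cons_of_mem cur hx)
      · intro hdD x hx
        rcases hcov hdD x hx with h | h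
        · exact Or.inl h
        · rcases List.mem_cons.mp h with rfl | h'
          · exact Or.inl hvc
          · exact Or.inr h'
      · intro hdD x hx y hy
        rcases hN hdD x hx y hy with h | h | h
        · exact Or.inl h
        · rcases List.mem_cons.mp h with rfl | h'
          · exact Or.inl hvc
          · exact Or.inr (Or.inl h')
        · exact Or.inr (Or.inr h)
    · have hcb : PySem.Set.contains visited cur = false := by simp [hvc]
      rw [hcb, Bool.false_or]
      by_cases hdD : d ≤ D
      · -- process cur
        have hdec : decide ((d : Int) > depth) = false := by
          rw [hdep]
          simp only [decide_eq_false_iff_not, gt_iff_lt, not_lt]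
          exact_mod_cast hdD
        rw [hdec, if_neg (by simp)]
        show goA graph node depth f (PySem.Set.add visited cur)
            ((l1t.map (fun x => (x, (d : Int))) ++ l2.map (fun x => (x, (d : Int) + 1))) ++
              ((pyAdj graph cur).filter
                  (fun nxt => !PySem.Set.contains (PySem.Set.add visited cur) nxt)).map
                (fun x => (x, (d : Int) + 1)))
            (if cur ≠ node then count + 1 else count)
          = (((RS graph node D).erase node).card : Int)
        have hcur : cur ∈ RS graph node d := hl1 cur (List.mem_cons_self)
        have hcuru : cur ∈ pvUniv graph node := RS_subset_univ graph node d cur hcur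
        have hWA := WA_drop graph node visited cur hcuru hvc
        have hlist : (l1t.map (fun x => (x, (d : Int))) ++ l2.map (fun x => (x, (d : Int) + 1))) ++
            ((pyAdj graph cur).filter
                (fun nxt => !PySem.Set.contains (PySem.Set.add visited cur) nxt)).map
              (fun x => (x, (d : Int) + 1)) =
            l1t.map (fun x => (x, (d : Int))) ++
              (l2 ++ (pyAdj graph cur).filter
                  (fun nxt => !PySem.Set.contains (PySem.Set.add visited cur) nxt)).map
                (fun x => (x, (d : Int) + 1)) := by
          rw [List.map_append, List.append_assoc]
        rw [hlist]
        have hpushlen : ((pyAdj graph cur).filter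
            (fun nxt => !PySem.Set.contains (PySem.Set.add visited cur) nxt)).length ≤
            (pyAdj graph cur).length := List.length_filter_le _ _
        have hpushmem : ∀ y, y ∈ (pyAdj graph cur).filter
            (fun nxt => !PySem.Set.contains (PySem.Set.add visited cur) nxt) ↔
            (y ∈ pyAdj graph cur ∧ ¬ y ∈ PySem.Set.add visited cur) := by
          intro y; simp [List.mem_filter]
        have hmemadd : ∀ y, y ∈ PySem.Set.add visited cur ↔ (y ∈ visited ∨ y = cur) :=
          fun y => PySem.Set.mem_add visited cur y
        refine IH (n - 1) ?_ f d l1t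
          (l2 ++ (pyAdj graph cur).filter
            (fun nxt => !PySem.Set.contains (PySem.Set.add visited cur) nxt))
          (PySem.Set.add visited cur) (if cur ≠ node then count + 1 else count)
          ?_ ?_ ?_ hd ?_ ?_ ?_ ?_ ?_ ?_ ?_
        · have hne : (if cur :: l1t = [] then (1 : Nat) else 0) = 0 := by simp
          simp only [List.length_cons] at hn
          rw [hne] at hn
          omega
        · have hind : (if l1t = [] then (1 : Nat) else 0) ≤ 1 := by split <;> omega
          have hne : (if cur :: l1t = [] then (1 : Nat) else 0) = 0 := by simp
          simp only [List.length_cons, List.length_append] at hn ⊢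
          rw [hne] at hn
          omega
        · have hne : (if cur :: l1t = [] then (1 : Nat) else 0) = 0 := by simp
          simp only [List.length_cons, List.length_append] at hfuel ⊢
          omega
        · rw [PySem.Set.add_of_not_mem hvc]
          exact List.Nodup.append hnd (List.nodup_singleton cur)
            (by intro a ha hamem; exact hvc ((List.mem_singleton.mp hamem) ▸ ha))
        · intro x hx
          rcases (hmemadd x).mp hx with h | hxcur
          · exact hV x h
          · rw [hxcur, Nat.min_eq_left hdD]
            exact hcur
        · exact fun x hx => hl1 x (List.mem_cons_of_mem cur hx)
        · intro x hx
          rcases List.mem_append.mp hx with h | h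
          · exact hl2 x h
          · obtain ⟨hadj, -⟩ := (hpushmem x).mp h
            rw [mem_RS_succ]
            exact Or.inr ⟨cur, hcur, hadj⟩
        · intro hdD' x hx
          rcases hcov hdD' x hx with h | h
          · exact Or.inl ((hmemadd x).mpr (Or.inl h))
          · rcases List.mem_cons.mp h with hxcur | hh
            · exact Or.inl ((hmemadd x).mpr (Or.inr hxcur))
            · exact Or.inr hh
        · intro hdD' x hx y hy
          rcases (hmemadd x).mp hx with hxv | hxcur
          · rcases hN hdD' x hxv y hy with h | h | h
            · exact Or.inl ((hmemadd y).mpr (Or.inl h))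
            · rcases List.mem_cons.mp h with hycur | hh
              · exact Or.inl ((hmemadd y).mpr (Or.inr hycur))
              · exact Or.inr (Or.inl hh)
            · exact Or.inr (Or.inr (List.mem_append.mpr (Or.inl h)))
          · by_cases hyv : y ∈ PySem.Set.add visited cur
            · exact Or.inl hyv
            · rw [hxcur] at hy
              exact Or.inr (Or.inr (List.mem_append.mpr
                (Or.inr ((hpushmem y).mpr ⟨hy, hyv⟩))))
        · intro hDd; omega
        · exact count_step visited node cur count hvc hcount
      · -- skip: dist > depth (d = D + 1)
        have hDd : d = D + 1 := by omega
        have hdec : decide ((d : Int) > depth) = true := by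
          rw [hdep, hDd]
          simp only [decide_eq_true_eq, gt_iff_lt]
          push_cast
          omega
        rw [hdec, if_pos rfl]
        refine IH (n - 1) ?_ f d l1t l2 visited count
          ?_ ?_ hnd hd hV ?_ hl2 ?_ ?_ hend hcount
        · have hne : (if cur :: l1t = [] then (1 : Nat) else 0) = 0 := by simp
          simp only [List.length_cons] at hn
          rw [hne] at hn
          omega
        · have hind : (if l1t = [] then (1 : Nat) else 0) ≤ 1 := by split <;> omega
          have hne : (if cur :: l1t = [] then (1 : Nat) else 0) = 0 := by simp
          simp only [List.length_cons] at hn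
          rw [hne] at hn
          omega
        · simp only [List.length_cons] at hfuel
          omega
        · exact fun x hx => hl1 x (List.mem_cons_of_mem cur hx)
        · intro h; omega
        · intro h; omega

-- ---------- B: the level-BFS invariant ----------
theorem innerFold_mem (visited : PySem.Set String) (l : List String) :
    ∀ (acc : PySem.Set String) (y : String),
    y ∈ l.foldl (fun a n => if PySem.Set.contains visited n then a else PySem.Set.add a n) acc ↔
      y ∈ acc ∨ (y ∈ l ∧ y ∉ visited) := by
  induction l with
  | nil => simp
  | cons a t ih =>
    intro acc y
    simp only [List.foldl_cons]
    by_cases hv : a ∈ visited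
    · have hc : PySem.Set.contains visited a = true := by simp [hv]
      rw [hc, if_pos rfl, ih]
      simp only [List.mem_cons]
      constructor
      · rintro (h | ⟨h1, h2⟩)
        · exact Or.inl h
        · exact Or.inr ⟨Or.inr h1, h2⟩
      · rintro (h | ⟨h1 | h1, h2⟩)
        · exact Or.inl h
        · exact absurd (h1 ▸ hv) h2
        · exact Or.inr ⟨h1, h2⟩
    · have hc : PySem.Set.contains visited a = false := by simp [hv]
      rw [hc, if_neg (by simp), ih]
      simp only [PySem.Set.mem_add, List.mem_cons]
      constructor
      · rintro (⟨h | h⟩ | ⟨h1, h2⟩)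
        · exact Or.inl h
        · exact Or.inr ⟨Or.inl h, h ▸ hv⟩
        · exact Or.inr ⟨Or.inr h1, h2⟩
      · rintro (h | ⟨h1 | h1, h2⟩)
        · exact Or.inl (Or.inl h)
        · exact Or.inl (Or.inr h1)
        · exact Or.inr ⟨h1, h2⟩

theorem nextFrontier_mem (graph : List (String × List String)) (visited : PySem.Set String)
    (frontier : List String) (y : String) :
    y ∈ nextFrontier graph visited frontier ↔
      ∃ c ∈ frontier, y ∈ pyAdj graph c ∧ y ∉ visited := by
  have key : ∀ (fr : List String) (acc : PySem.Set String),
      y ∈ fr.foldl (fun acc cur => (pyAdj graph cur).foldl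
        (fun acc2 nxt => if PySem.Set.contains visited nxt then acc2 else PySem.Set.add acc2 nxt)
        acc) acc ↔ y ∈ acc ∨ ∃ c ∈ fr, y ∈ pyAdj graph c ∧ y ∉ visited := by
    intro fr
    induction fr with
    | nil => simp
    | cons c t ih =>
      intro acc
      simp only [List.foldl_cons]
      rw [ih, innerFold_mem]
      simp only [List.mem_cons]
      constructor
      · rintro (⟨h | ⟨h1, h2⟩⟩ | ⟨u, hu, h1, h2⟩)
        · exact Or.inl h
        · exact Or.inr ⟨c, Or.inl rfl, h1, h2⟩
        · exact Or.inr ⟨u, Or.inr hu, h1, h2⟩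
      · rintro (h | ⟨u, (hu | hu), h1, h2⟩)
        · exact Or.inl (Or.inl h)
        · exact Or.inl (Or.inr ⟨hu ▸ h1, h2⟩)
        · exact Or.inr ⟨u, hu, h1, h2⟩
  rw [nextFrontier, key]
  simp [PySem.Set.empty]

theorem goB_inv (graph : List (String × List String)) (node : String) (depth : Int) (D : Nat)
    (hdep : depth = (D : Int)) :
    ∀ fuel : Nat, ∀ k : Nat, ∀ visited frontier : PySem.Set String,
    1 ≤ fuel →
    (frontier ≠ [] → WB graph node visited + 2 ≤ fuel) →
    visited.Nodup →
    k ≤ D →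
    (∀ x ∈ frontier, x ∈ visited) →
    (∀ x, x ∈ visited ↔ x ∈ RS graph node k) →
    (∀ x ∈ visited, ∀ y ∈ pyAdj graph x, y ∈ visited ∨ ∃ c ∈ frontier, y ∈ pyAdj graph c) →
    (goB graph depth fuel (k : Int) visited frontier).Nodup ∧
      ∀ y, y ∈ goB graph depth fuel (k : Int) visited frontier ↔ y ∈ RS graph node D := by
  intro fuel
  induction fuel with
  | zero => intro k visited frontier h1; omega
  | succ f ih =>
    intro k visited frontier h1 h2 hnd hk hfv hvis hcl
    by_cases hfr : frontier = []
    · subst hfr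
      have hred : goB graph depth (f + 1) (k : Int) visited [] = visited := by
        simp [goB]
      rw [hred]
      have hstab : RS graph node (k + 1) ⊆ RS graph node k := by
        intro y hy
        rw [mem_RS_succ] at hy
        rcases hy with hy | ⟨u, hu, hyu⟩
        · exact hy
        · have huv : u ∈ visited := (hvis u).mpr hu
          rcases hcl u huv y hyu with h | ⟨c, hc, -⟩
          · exact (hvis y).mp h
          · simp at hc
      refine ⟨hnd, fun y => ?_⟩
      rw [hvis y, RS_stab graph node hstab hk]
    · by_cases hkD : k = D
      · have hdecb : decide ((k : Int) < depth) = false := by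
          subst hkD
          rw [hdep]
          simp
        have hred : goB graph depth (f + 1) (k : Int) visited frontier = visited := by
          simp [goB, hdecb]
        rw [hred]
        subst hkD
        exact ⟨hnd, fun y => hvis y⟩
      · have hkD' : k < D := lt_of_le_of_ne hk hkD
        have hfrb : frontier.isEmpty = false := by
          simp [hfr]
        have hdecb : decide ((k : Int) < depth) = true := by
          rw [hdep]
          simp only [decide_eq_true_eq]
          exact_mod_cast hkD'
        have hred : goB graph depth (f + 1) (k : Int) visited frontier =
            goB graph depth f ((k : Int) + 1)
              (PySem.Set.update visited (nextFrontier graph visited frontier))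
              (nextFrontier graph visited frontier) := by
          simp only [goB, hfrb, hdecb, Bool.not_false, Bool.and_self]
          rfl
        rw [hred]
        have hcast : ((k : Int) + 1) = (((k + 1 : Nat)) : Int) := by push_cast; ring
        rw [hcast]
        have hmemup : ∀ y, y ∈ PySem.Set.update visited (nextFrontier graph visited frontier) ↔
            (y ∈ visited ∨ y ∈ nextFrontier graph visited frontier) := by
          intro y
          exact PySem.Set.mem_update visited (nextFrontier graph visited frontier) y
        have hWBle : WB graph node visited + 2 ≤ f + 1 := h2 hfr
        refine ih (k + 1) (PySem.Set.update visited (nextFrontier graph visited frontier))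
          (nextFrontier graph visited frontier) (by omega) ?_ ?_ (by omega) ?_ ?_ ?_
        · -- fuel bound when the new frontier is nonempty
          intro hne
          obtain ⟨y, hy⟩ := List.exists_mem_of_ne_nil _ hne
          obtain ⟨c, hc, hyc, hyv⟩ := (nextFrontier_mem graph visited frontier y).mp hy
          have hyu : y ∈ pvUniv graph node := by
            simp only [pvUniv, List.mem_cons]
            exact Or.inr (pyAdj_subset graph c y hyc)
          have hdrop := WB_drop graph node visited
            (PySem.Set.update visited (nextFrontier graph visited frontier)) y
            (fun x hx => (hmemup x).mpr (Or.inl hx)) hyu hyv ((hmemup y).mpr (Or.inr hy))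
          omega
        · exact PySem.Set.nodup_update visited (nextFrontier graph visited frontier) hnd
        · intro x hx
          exact (hmemup x).mpr (Or.inr hx)
        · intro x
          rw [hmemup x, mem_RS_succ]
          constructor
          · rintro (h | h)
            · exact Or.inl ((hvis x).mp h)
            · obtain ⟨c, hc, hxc, -⟩ := (nextFrontier_mem graph visited frontier x).mp h
              exact Or.inr ⟨c, (hvis c).mp (hfv c hc), hxc⟩
          · rintro (h | ⟨u, hu, hxu⟩)
            · exact Or.inl ((hvis x).mpr h)
            · have huv : u ∈ visited := (hvis u).mpr hu
              rcases hcl u huv x hxu with h' | ⟨c, hc, hxc⟩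
              · exact Or.inl h'
              · by_cases hxv : x ∈ visited
                · exact Or.inl hxv
                · exact Or.inr ((nextFrontier_mem graph visited frontier x).mpr ⟨c, hc, hxc, hxv⟩)
        · intro x hx y hy
          rcases (hmemup x).mp hx with hxv | hxf
          · rcases hcl x hxv y hy with h | ⟨c, hc, hyc⟩
            · exact Or.inl ((hmemup y).mpr (Or.inl h))
            · by_cases hyv : y ∈ visited
              · exact Or.inl ((hmemup y).mpr (Or.inl hyv))
              · exact Or.inl ((hmemup y).mpr (Or.inr
                  ((nextFrontier_mem graph visited frontier y).mpr ⟨c, hc, hyc, hyv⟩)))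
          · exact Or.inr ⟨x, hxf, hy⟩

-- ---------- evaluating the two ports ----------
theorem WA_empty (graph : List (String × List String)) (node : String) :
    WA graph node PySem.Set.empty =
      (((pvUniv graph node).map (fun x => 1 + (pyAdj graph x).length)).sum) := by
  unfold WA
  simp [PySem.Set.empty]

theorem A_eval (graph : List (String × List String)) (node : String) (depth : Int) (D : Nat)
    (hdep : depth = (D : Int)) :
    impact_radius graph node depth = (((RS graph node D).erase node).card : Int) := by
  unfold impact_radius
  have hshape : ([(node, (0 : Int))] : List (String × Int)) =
      ([node].map (fun x => (x, ((0 : Nat) : Int))) ++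
        ([] : List String).map (fun x => (x, ((0 : Nat) : Int) + 1))) := by
    simp
  rw [hshape]
  refine goA_inv graph node depth D hdep
    (2 * (([node] : List String).length + ([] : List String).length +
      WA graph node PySem.Set.empty) + (if ([node] : List String) = [] then 1 else 0))
    _ _ _ _ _ _ ?_ ?_ ?_ ?_ ?_ ?_ ?_ ?_ ?_ ?_ ?_
  · exact le_refl _
  · unfold fuelA
    rw [WA_empty]
    simp
  · simp [PySem.Set.empty]
  · omega
  · intro x hx
    simp [PySem.Set.empty] at hx
  · intro x hx
    simp at hx
    simp [RS, hx]
  · intro x hx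
    simp at hx
  · intro hdD x hx
    simp [RS] at hx
    simp [hx]
  · intro hdD x hx
    simp [PySem.Set.empty] at hx
  · intro h; omega
  · simp [PySem.Set.empty]

theorem B_eval (graph : List (String × List String)) (node : String) (depth : Int) (D : Nat)
    (hdep : depth = (D : Int)) :
    impact_radius_alt graph node depth = ((RS graph node D).card : Int) - 1 := by
  unfold impact_radius_alt
  have hof : PySem.Set.ofList [node] = [node] :=
    PySem.Set.ofList_eq_self_of_nodup [node] (List.nodup_singleton node)
  rw [hof]
  have hcast : (0 : Int) = ((0 : Nat) : Int) := rfl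
  rw [hcast]
  have hWB : WB graph node [node] ≤ (pvUniv graph node).length :=
    sum_map_le_length _ (fun x => by split <;> omega) _
  obtain ⟨hndR, hmemR⟩ := goB_inv graph node depth D hdep (fuelB graph node) 0 [node] [node]
    (by unfold fuelB; omega)
    (fun _ => by unfold fuelB; omega)
    (List.nodup_singleton node)
    (Nat.zero_le D)
    (fun x hx => hx)
    (fun x => by simp [RS])
    (fun x hx y hy => by
      simp at hx
      exact Or.inr ⟨node, by simp, hx ▸ hy⟩)
  have hlen : (goB graph depth (fuelB graph node) ((0 : Nat) : Int) [node] [node]).length =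
      (RS graph node D).card := by
    rw [← List.toFinset_card_of_nodup hndR]
    congr 1
    ext y
    rw [List.mem_toFinset]
    exact hmemR y
  show ((goB graph depth (fuelB graph node) ((0 : Nat) : Int) [node] [node]).length : Int) - 1 =
    ((RS graph node D).card : Int) - 1
  rw [hlen]

theorem A_neg (graph : List (String × List String)) (node : String) (depth : Int)
    (hneg : depth < 0) : impact_radius graph node depth = 0 := by
  unfold impact_radius
  have hc1 : PySem.Set.contains PySem.Set.empty node = false := by
    simp [PySem.Set.empty]
  have hc2 : decide ((0 : Int) > depth) = true := by
    simp only [decide_eq_true_eq, gt_iff_lt]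
    omega
  have h2 : fuelA graph node =
      (((pvUniv graph node).map (fun x => 1 + (pyAdj graph x).length)).sum) + 1 + 1 := by
    unfold fuelA; omega
  rw [h2]
  simp only [goA, hc1, hc2, Bool.false_or]
  simp

theorem B_neg (graph : List (String × List String)) (node : String) (depth : Int)
    (hneg : depth < 0) : impact_radius_alt graph node depth = 0 := by
  unfold impact_radius_alt
  have hc : decide ((0 : Int) < depth) = false := by
    simp only [decide_eq_false_iff_not, not_lt]
    omega
  have h2 : fuelB graph node = (pvUniv graph node).length + 1 + 1 := by
    unfold fuelB; omega
  rw [h2, PySem.Set.ofList_eq_self_of_nodup [node] (List.nodup_singleton node)]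
  have hred : goB graph depth ((pvUniv graph node).length + 1 + 1) 0 [node] [node] = [node] := by
    simp [goB, hc]
  show ((goB graph depth ((pvUniv graph node).length + 1 + 1) 0 [node] [node]).length : Int) - 1 = 0
  rw [hred]
  simp

-- ===== VERDICT (by name: the statement is the Claim_ definition above) =====
theorem impact_radius_spec : Claim_equal_impact_radius := by
  unfold Claim_equal_impact_radius Spec_impact_radius
  intro graph node depth _
  by_cases hpos : 0 ≤ depth
  · have hdep : depth = ((depth.toNat : Nat) : Int) := (Int.toNat_of_nonneg hpos).symm
    rw [A_eval graph node depth depth.toNat hdep, B_eval graph node depth depth.toNat hdep]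
    have hnode : node ∈ RS graph node depth.toNat := node_mem_RS graph node depth.toNat
    have hcard := Finset.card_erase_add_one hnode
    omega
  · have hneg : depth < 0 := by omega
    rw [A_neg graph node depth hneg, B_neg graph node depth hneg]
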